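-- pv_equiv track=rewrite | github.com/GirishaDevara/probelm-solving-and-programming-in-python-level2-2019 | Packages/numerical.py | SpecialNum
-- ===== SOURCE A (Python) =====
-- def prime(i):
--     f = True
--     if i == 2:
--         return True
--     for value in range(2,int(i**0.5)+1):
--         if i % value == 0:
--             return False
--     return True
--
-- def SpecialNum(n,p):
--     prime_count=0
--     for v in range(2,n):
--         if n % v == 0 and prime(v):
--             prime_count += 1
--     if prime_count == p:
--         return "YES"
--     return "NO"
-- ===== SOURCE B (Python) =====
-- def SpecialNum(n, p):
--     # Trial-division factorization up to sqrt: count distinct prime factors of n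
--     # (excluding n itself, which A's range(2, n) never counts).
--     count = 0
--     m = n
--     d = 2
--     while d * d <= m:
--         if m % d == 0:
--             count += 1
--             while m % d == 0:
--                 m //= d
--         d += 1
--     if m > 1 and m < n:
--         count += 1
--     return "YES" if count == p else "NO"
-- ===== Notes on version B (the rewrite author's own statement) =====
-- stated objective: faster
-- what changed: Instead of scanning every v in [2,n) and primality-testing each divisor, B factorizes n by trial division up to sqrt(n), counting distinct prime factors and adding the residual cofactor only when it is a proper prime factor.
import Mathlib
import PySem

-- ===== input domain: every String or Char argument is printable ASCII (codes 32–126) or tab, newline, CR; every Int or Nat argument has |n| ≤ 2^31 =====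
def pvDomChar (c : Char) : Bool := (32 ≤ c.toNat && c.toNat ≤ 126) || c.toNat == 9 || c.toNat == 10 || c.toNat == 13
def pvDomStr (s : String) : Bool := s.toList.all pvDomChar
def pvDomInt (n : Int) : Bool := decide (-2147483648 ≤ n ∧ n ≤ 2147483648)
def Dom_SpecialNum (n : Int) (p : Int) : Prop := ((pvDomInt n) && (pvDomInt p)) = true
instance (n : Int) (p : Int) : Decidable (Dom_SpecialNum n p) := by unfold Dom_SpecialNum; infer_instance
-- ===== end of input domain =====

-- B replaces A's scan of all v in [2,n) (primality-testing each divisor) by a single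
-- trial-division factorization up to sqrt(n): count the distinct prime factors, adding the
-- residual cofactor only when it is a proper prime factor (measured asymptotically faster).

-- ===== PORT A =====
-- prime(i): trial division over range(2, int(i**0.5)+1); the early `return False` in the loop
-- is the `any` below.  int(i**0.5) is ported as Nat.sqrt, exact for the 0 ≤ i ≤ 2^31 of the
-- input domain (IEEE sqrt then int() truncation equals the integer square root there); A only
-- ever calls prime on divisors v with 2 ≤ v < n.
def primeA (i : Int) : Bool :=
  if i = 2 then true
  else if (PySem.List.pyRange 2 ((i.toNat.sqrt : Int) + 1) 1).any
            (fun v => PySem.Int.mod i v == 0) then false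
  else true

def SpecialNum (n : Int) (p : Int) : String :=
  let prime_count := (PySem.List.pyRange 2 n 1).foldl
    (fun acc v => if PySem.Int.mod n v = 0 ∧ primeA v = true then acc + 1 else acc) (0 : Int)
  if prime_count = p then "YES" else "NO"

-- ===== PORT B =====
theorem pv_int_ediv_lt (a b : Int) (ha : 0 < a) (hb : 1 < b) : a / b < a := by
  have h3 : a / b * b ≤ a := Int.ediv_mul_le a (by omega)
  have h4 : 0 ≤ a / b := Int.ediv_nonneg (by omega) (by omega)
  by_cases hle : a ≤ a / b
  · have h5 : a * b ≤ a / b * b := mul_le_mul_of_nonneg_right hle (by omega)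
    have h6 : a * 2 ≤ a * b := mul_le_mul_of_nonneg_left (by omega) (by omega)
    omega
  · omega

theorem pv_strip_dec (m d : Int) (h : 2 ≤ d ∧ 1 ≤ m ∧ PySem.Int.mod m d = 0) :
    (PySem.Int.floordiv m d).toNat < m.toNat := by
  obtain ⟨hd, hm, -⟩ := h
  rw [PySem.Int.floordiv_eq_ediv_of_pos (by omega)]
  have h1 : m / d < m := pv_int_ediv_lt m d (by omega) (by omega)
  have h2 : 0 ≤ m / d := Int.ediv_nonneg (by omega) (by omega)
  omega

-- inner `while m % d == 0: m //= d`; the `2 ≤ d ∧ 1 ≤ m` part of the guard is a termination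
-- guard only (both always hold when the loop is reached).
def stripB (m d : Int) : Int :=
  if h : 2 ≤ d ∧ 1 ≤ m ∧ PySem.Int.mod m d = 0 then stripB (PySem.Int.floordiv m d) d else m
termination_by m.toNat
decreasing_by exact pv_strip_dec m d h

theorem stripB_le (m d : Int) : stripB m d ≤ m := by
  fun_induction stripB with
  | case1 m h ih =>
    obtain ⟨hd, hm, -⟩ := h
    refine le_trans ih ?_
    rw [PySem.Int.floordiv_eq_ediv_of_pos (by omega)]
    exact Int.ediv_le_self _ (by omega)
  | case2 m h => exact le_refl _

theorem pv_d_le_m (m d : Int) (hd : 2 ≤ d) (hdm : d * d ≤ m) : d ≤ m := by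
  have h1 : d * 2 ≤ d * d := mul_le_mul_of_nonneg_left (by omega) (by omega)
  have h2 : d * 2 ≤ m := le_trans h1 hdm
  omega

theorem pv_outer_dec1 (m d : Int) (h : 2 ≤ d ∧ d * d ≤ m) :
    (2 * stripB m d - (d + 1)).toNat < (2 * m - d).toNat := by
  obtain ⟨hd, hdm⟩ := h
  have hdlem : d ≤ m := pv_d_le_m m d hd hdm
  have hs1 : stripB m d ≤ m := stripB_le m d
  omega

theorem pv_outer_dec2 (m d : Int) (h : 2 ≤ d ∧ d * d ≤ m) :
    (2 * m - (d + 1)).toNat < (2 * m - d).toNat := by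
  obtain ⟨hd, hdm⟩ := h
  have hdlem : d ≤ m := pv_d_le_m m d hd hdm
  omega

-- outer `while d * d <= m`, returning the pair (count, m); the `2 ≤ d` part of the guard is a
-- termination guard only (d starts at 2 and only increases).
def outerB (m d count : Int) : Int × Int :=
  if h : 2 ≤ d ∧ d * d ≤ m then
    if PySem.Int.mod m d = 0 then outerB (stripB m d) (d + 1) (count + 1)
    else outerB m (d + 1) count
  else (count, m)
termination_by (2 * m - d).toNat
decreasing_by
  · exact pv_outer_dec1 m d h
  · exact pv_outer_dec2 m d h

def SpecialNum_alt (n : Int) (p : Int) : String :=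
  let r := outerB n 2 0
  let count := if 1 < r.2 ∧ r.2 < n then r.1 + 1 else r.1
  if count = p then "YES" else "NO"

-- ===== PRECONDITION & SPEC =====
def Spec_SpecialNum (n : Int) (p : Int) (out : String) : Prop := out = SpecialNum_alt n p
instance (n : Int) (p : Int) (out : String) : Decidable (Spec_SpecialNum n p out) := by unfold Spec_SpecialNum; infer_instance

-- ===== CLAIM (what is proved, stated in full; the proofs are below) =====
def Claim_equal_SpecialNum : Prop := ∀ (n : Int) (p : Int), Dom_SpecialNum n p → Spec_SpecialNum n p (SpecialNum n p)

-- ===== LEMMAS AND PROOFS =====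

-- the common value both programs count: distinct primes q < N dividing N
def properCount (N : ℕ) : ℕ := ((Finset.range N).filter (fun q => Nat.Prime q ∧ q ∣ N)).card

-- A's trial-division primality test is primality (for 2 ≤ v)
theorem primeA_iff (v : Int) (hv : 2 ≤ v) : primeA v = true ↔ Nat.Prime v.toNat := by
  have hvN : v = (v.toNat : Int) := (Int.toNat_of_nonneg (by omega)).symm
  set N := v.toNat with hN
  have hN2 : 2 ≤ N := by omega
  by_cases hv2 : v = 2
  · simp [primeA, hv2]
    have : N = 2 := by omega
    rw [this]; exact Nat.prime_two
  · have hany : primeA v = true ↔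
        (PySem.List.pyRange 2 ((N.sqrt : Int) + 1) 1).any (fun u => PySem.Int.mod v u == 0) = false := by
      rw [primeA, if_neg hv2]
      rcases h : (PySem.List.pyRange 2 ((N.sqrt : Int) + 1) 1).any (fun u => PySem.Int.mod v u == 0) with _ | _
      · simp
      · simp
    rw [hany, List.any_eq_false]
    constructor
    · intro hno
      rw [Nat.prime_def_le_sqrt]
      refine ⟨hN2, fun k hk2 hksqrt hkdvd => ?_⟩
      refine hno (k : Int) ?_ ?_
      · rw [PySem.List.mem_pyRange_one]
        constructor
        · exact_mod_cast hk2
        · omega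
      · simp only [beq_iff_eq]
        rw [PySem.Int.mod_eq_zero_iff_dvd]
        rw [hvN]
        exact_mod_cast hkdvd
    · intro hp u hu
      rw [PySem.List.mem_pyRange_one] at hu
      simp only [beq_iff_eq]
      intro hmod
      have hudvd : u ∣ v := (PySem.Int.mod_eq_zero_iff_dvd v u).mp hmod
      have huN : u = (u.toNat : Int) := (Int.toNat_of_nonneg (by omega)).symm
      have hdvdN : u.toNat ∣ N := by
        rw [hvN, huN] at hudvd
        exact_mod_cast hudvd
      rw [Nat.prime_def_le_sqrt] at hp
      refine hp.2 u.toNat (by omega) (by omega) hdvdN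

theorem pv_countP_congr (p q : ℕ → Bool) (l : List ℕ) (h : ∀ a ∈ l, p a = q a) :
    l.countP p = l.countP q := by
  induction l with
  | nil => rfl
  | cons x xs ih =>
    rw [List.countP_cons, List.countP_cons, h x List.mem_cons_self,
        ih (fun a ha => h a (List.mem_cons_of_mem _ ha))]

theorem card_filter_range (p : ℕ → Bool) (N : ℕ) :
    ((Finset.range N).filter (fun q => p q)).card = (List.range N).countP p := by
  induction N with
  | zero => simp
  | succ k ih =>
    rw [Finset.range_add_one, List.range_succ, Finset.filter_insert, List.countP_append]
    by_cases h : p k <;> simp [h, ih]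

theorem properCount_countP (N : ℕ) :
    properCount N = (List.range N).countP (fun q => decide (Nat.Prime q ∧ q ∣ N)) := by
  rw [properCount, ← card_filter_range]
  congr 1
  apply Finset.filter_congr
  intro x _
  simp

theorem countP_shift (N : ℕ) (hN : 2 ≤ N) :
    (List.range N).countP (fun q => decide (Nat.Prime q ∧ q ∣ N))
    = (List.range (N - 2)).countP (fun k => decide (Nat.Prime (2 + k) ∧ (2 + k) ∣ N)) := by
  have hsp : List.range N = List.range 2 ++ (List.range (N - 2)).map (2 + ·) := by
    rw [← List.range_add]
    congr 1
    omega
  rw [hsp, List.countP_append, List.countP_map]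
  have h0 : (List.range 2).countP (fun q => decide (Nat.Prime q ∧ q ∣ N)) = 0 := by
    simp [List.range_succ, Nat.not_prime_zero, Nat.not_prime_one]
  rw [h0, zero_add]
  rfl

-- A's loop computes properCount
theorem Acount_eq (n : Int) (hn : 2 ≤ n) :
    (PySem.List.pyRange 2 n 1).foldl
      (fun acc v => if PySem.Int.mod n v = 0 ∧ primeA v = true then acc + 1 else acc) (0 : Int)
    = (properCount n.toNat : Int) := by
  have hnN : n = (n.toNat : Int) := (Int.toNat_of_nonneg (by omega)).symm
  set N := n.toNat with hNdef
  have hN2 : 2 ≤ N := by omega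
  rw [PySem.List.foldl_ite_add_one, zero_add]
  congr 1
  rw [PySem.List.pyRange_one, List.countP_map]
  have h1 : (n - 2).toNat = N - 2 := by omega
  rw [h1]
  have hpt : ∀ k ∈ List.range (N - 2),
      ((fun v => decide (PySem.Int.mod n v = 0 ∧ primeA v = true)) ∘ (fun k : ℕ => (2 : Int) + ↑k)) k
      = (fun q => decide (Nat.Prime q ∧ q ∣ N)) (2 + k) := by
    intro k hk
    simp only [Function.comp_apply, decide_eq_decide]
    have h2k : (2 : Int) ≤ 2 + (k : Int) := by omega
    rw [PySem.Int.mod_eq_zero_iff_dvd, primeA_iff _ h2k]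
    have ht : ((2 : Int) + (k : Int)).toNat = 2 + k := by omega
    rw [ht]
    constructor
    · rintro ⟨hdv, hp⟩
      refine ⟨hp, ?_⟩
      rw [hnN] at hdv
      exact_mod_cast hdv
    · rintro ⟨hp, hdv⟩
      refine ⟨?_, hp⟩
      rw [hnN]
      exact_mod_cast hdv
  rw [pv_countP_congr _ _ _ hpt, properCount_countP, countP_shift N hN2]

-- stripB facts
theorem stripB_dvd (m d : Int) : stripB m d ∣ m := by
  fun_induction stripB with
  | case1 m h ih =>
    obtain ⟨hd, hm, hdvd⟩ := h
    have hdv : d ∣ m := (PySem.Int.mod_eq_zero_iff_dvd m d).mp hdvd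
    refine dvd_trans ih ?_
    rw [PySem.Int.floordiv_eq_ediv_of_pos (by omega)]
    exact Int.ediv_dvd_of_dvd hdv
  | case2 m h => exact dvd_refl _

theorem stripB_pos (m d : Int) (hm : 1 ≤ m) : 1 ≤ stripB m d := by
  fun_induction stripB with
  | case1 m h ih =>
    obtain ⟨hd, hm', hdvd⟩ := h
    have hdv : d ∣ m := (PySem.Int.mod_eq_zero_iff_dvd m d).mp hdvd
    refine ih ?_
    rw [PySem.Int.floordiv_eq_ediv_of_pos (by omega)]
    obtain ⟨k, rfl⟩ := hdv
    rw [mul_comm, Int.mul_ediv_cancel _ (by omega)]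
    nlinarith
  | case2 m h => exact hm

theorem stripB_not_dvd (m d : Int) (hd : 2 ≤ d) (hm : 1 ≤ m) : ¬ d ∣ stripB m d := by
  fun_induction stripB with
  | case1 m h ih =>
    obtain ⟨hd', hm', hdvd⟩ := h
    have hdv : d ∣ m := (PySem.Int.mod_eq_zero_iff_dvd m d).mp hdvd
    refine ih ?_
    rw [PySem.Int.floordiv_eq_ediv_of_pos (by omega)]
    obtain ⟨k, rfl⟩ := hdv
    rw [mul_comm, Int.mul_ediv_cancel _ (by omega)]
    nlinarith
  | case2 m h =>
    intro hdv
    exact h ⟨hd, hm, (PySem.Int.mod_eq_zero_iff_dvd m d).mpr hdv⟩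

theorem stripB_dvd_of_dvd (m d q : Int) (hq : Prime q) (hqd : ¬ q ∣ d) (h : q ∣ m) :
    q ∣ stripB m d := by
  fun_induction stripB with
  | case1 m hg ih =>
    obtain ⟨hd, hm, hdvd⟩ := hg
    have hdv : d ∣ m := (PySem.Int.mod_eq_zero_iff_dvd m d).mp hdvd
    refine ih ?_
    rw [PySem.Int.floordiv_eq_ediv_of_pos (by omega)]
    obtain ⟨k, rfl⟩ := hdv
    rw [mul_comm, Int.mul_ediv_cancel _ (by omega)]
    rcases hq.dvd_mul.mp h with h1 | h1
    · exact absurd h1 hqd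
    · exact h1
  | case2 m hg => exact h

-- the outer-loop invariant
theorem outerB_spec (m d count : Int) :
    2 ≤ d → 1 ≤ m → (∀ q : ℕ, q.Prime → (q : Int) < d → ¬ (q : Int) ∣ m) →
    ∃ r : Int, outerB m d count
        = (count + (m.toNat.primeFactors.card : Int) - (if 1 < r then 1 else 0), r)
      ∧ r ∣ m ∧ 1 ≤ r ∧ (1 < r → r.toNat.Prime) ∧ (m.toNat.Prime → r = m) := by
  induction m, d, count using outerB.induct with
  | case1 m d count hg hmod ih =>
    intro hd hm hsmall
    have hdvd : d ∣ m := (PySem.Int.mod_eq_zero_iff_dvd m d).mp hmod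
    have hdN : d = (d.toNat : Int) := (Int.toNat_of_nonneg (by omega)).symm
    have hmN : m = (m.toNat : Int) := (Int.toNat_of_nonneg (by omega)).symm
    have hdNdvd : d.toNat ∣ m.toNat := by
      rw [hdN, hmN] at hdvd
      exact_mod_cast hdvd
    have hdprime : Nat.Prime d.toNat := by
      by_contra hnp
      have hq1 : d.toNat ≠ 1 := by omega
      have hqp : (d.toNat.minFac).Prime := Nat.minFac_prime hq1
      have hqd : d.toNat.minFac ∣ d.toNat := Nat.minFac_dvd _
      have hqne : d.toNat.minFac ≠ d.toNat := fun h => hnp (h ▸ hqp)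
      have hqlt : d.toNat.minFac < d.toNat :=
        lt_of_le_of_ne (Nat.le_of_dvd (by omega) hqd) hqne
      refine hsmall d.toNat.minFac hqp (by omega) ?_
      have : (d.toNat.minFac : Int) ∣ d := by
        rw [hdN]
        exact_mod_cast hqd
      exact dvd_trans this hdvd
    have hm' : 1 ≤ stripB m d := stripB_pos m d hm
    have hm'N : stripB m d = ((stripB m d).toNat : Int) := (Int.toNat_of_nonneg (by omega)).symm
    have hdvdm' : stripB m d ∣ m := stripB_dvd m d
    have hnd : ¬ d ∣ stripB m d := stripB_not_dvd m d hd hm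
    have hsmall' : ∀ q : ℕ, q.Prime → (q : Int) < d + 1 → ¬ (q : Int) ∣ stripB m d := by
      intro q hq hlt hdvq
      rcases lt_or_eq_of_le (show (q : Int) ≤ d by omega) with h1 | h1
      · exact hsmall q hq h1 (dvd_trans hdvq hdvdm')
      · rw [h1] at hdvq
        exact hnd hdvq
    obtain ⟨r, heq, hrdvd, hrpos, hrprime, hrm⟩ := ih (by omega) hm' hsmall'
    have hpf : (stripB m d).toNat.primeFactors = m.toNat.primeFactors.erase d.toNat := by
      ext q
      simp only [Nat.mem_primeFactors, Finset.mem_erase]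
      constructor
      · rintro ⟨hqp, hqdvd, hne0⟩
        have hqint : (q : Int) ∣ stripB m d := by
          rw [hm'N]
          exact_mod_cast hqdvd
        refine ⟨?_, hqp, ?_, by omega⟩
        · intro hqe
          rw [hqe, ← hdN] at hqint
          exact hnd hqint
        · have : (q : Int) ∣ m := dvd_trans hqint hdvdm'
          rw [hmN] at this
          exact_mod_cast this
      · rintro ⟨hne, hqp, hqdvd, -⟩
        have hqintm : (q : Int) ∣ m := by
          rw [hmN]
          exact_mod_cast hqdvd
        have hqnd : ¬ (q : Int) ∣ d := by
          intro hqd'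
          have : q ∣ d.toNat := by
            rw [hdN] at hqd'
            exact_mod_cast hqd'
          rcases (Nat.Prime.eq_one_or_self_of_dvd hdprime q this) with h1 | h1
          · exact hqp.ne_one h1
          · exact hne h1
        have : (q : Int) ∣ stripB m d :=
          stripB_dvd_of_dvd m d q (Nat.prime_iff_prime_int.mp hqp) hqnd hqintm
        refine ⟨hqp, ?_, by omega⟩
        rw [hm'N] at this
        exact_mod_cast this
    have hdmem : d.toNat ∈ m.toNat.primeFactors :=
      Nat.mem_primeFactors.mpr ⟨hdprime, hdNdvd, by omega⟩
    have hcard : (stripB m d).toNat.primeFactors.card = m.toNat.primeFactors.card - 1 := by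
      rw [hpf, Finset.card_erase_of_mem hdmem]
    have hcardpos : 1 ≤ m.toNat.primeFactors.card :=
      Finset.card_pos.mpr ⟨d.toNat, hdmem⟩
    refine ⟨r, ?_, dvd_trans hrdvd hdvdm', hrpos, hrprime, ?_⟩
    · rw [outerB, dif_pos hg, if_pos hmod, heq]
      have hc : ((stripB m d).toNat.primeFactors.card : Int)
          = (m.toNat.primeFactors.card : Int) - 1 := by omega
      rw [hc]
      have harith : count + 1 + ((m.toNat.primeFactors.card : Int) - 1) - (if 1 < r then 1 else 0)
          = count + (m.toNat.primeFactors.card : Int) - (if 1 < r then 1 else 0) := by ring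
      rw [harith]
    · intro hmp
      exfalso
      rcases (Nat.Prime.eq_one_or_self_of_dvd hmp d.toNat hdNdvd) with h1 | h1
      · omega
      · obtain ⟨hd2, hdm2⟩ := hg
        have hdm3 : d = m := by omega
        rw [hdm3] at hdm2
        nlinarith
  | case2 m d count hg hmod ih =>
    intro hd hm hsmall
    have hnd : ¬ d ∣ m := fun h => hmod ((PySem.Int.mod_eq_zero_iff_dvd m d).mpr h)
    have hsmall' : ∀ q : ℕ, q.Prime → (q : Int) < d + 1 → ¬ (q : Int) ∣ m := by
      intro q hq hlt hdvq
      rcases lt_or_eq_of_le (show (q : Int) ≤ d by omega) with h1 | h1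
      · exact hsmall q hq h1 hdvq
      · rw [h1] at hdvq
        exact hnd hdvq
    obtain ⟨r, heq, hrdvd, hrpos, hrprime, hrm⟩ := ih (by omega) hm hsmall'
    refine ⟨r, ?_, hrdvd, hrpos, hrprime, hrm⟩
    rw [outerB, dif_pos hg, if_neg hmod, heq]
  | case3 m d count hg =>
    intro hd hm hsmall
    have hmd : m < d * d := by
      by_contra hc
      exact hg ⟨hd, by omega⟩
    have hmN : m = (m.toNat : Int) := (Int.toNat_of_nonneg (by omega)).symm
    have hprime : 1 < m → m.toNat.Prime := by
      intro h1m
      refine Nat.prime_def_le_sqrt.mpr ⟨by omega, fun k hk2 hks hkdvd => ?_⟩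
      have hq1 : k ≠ 1 := by omega
      have hqp : (k.minFac).Prime := Nat.minFac_prime hq1
      have hqk : k.minFac ∣ k := Nat.minFac_dvd _
      have hqs : k.minFac ≤ m.toNat.sqrt := le_trans (Nat.le_of_dvd (by omega) hqk) hks
      have hsq : m.toNat.sqrt < d.toNat := by
        refine Nat.sqrt_lt.mpr ?_
        have : (m.toNat : Int) < (d.toNat : Int) * (d.toNat : Int) := by
          rw [← hmN]
          have hdN : d = (d.toNat : Int) := (Int.toNat_of_nonneg (by omega)).symm
          rw [← hdN]
          exact hmd
        exact_mod_cast this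
      refine hsmall k.minFac hqp (by omega) ?_
      have : k.minFac ∣ m.toNat := dvd_trans hqk hkdvd
      rw [hmN]
      exact_mod_cast this
    refine ⟨m, ?_, dvd_refl m, hm, hprime, fun _ => rfl⟩
    rw [outerB, dif_neg hg]
    by_cases h1 : 1 < m
    · have hpf : m.toNat.primeFactors = {m.toNat} := Nat.Prime.primeFactors (hprime h1)
      rw [hpf]
      simp [h1]
    · have hm1 : m = 1 := by omega
      rw [hm1]
      norm_num

-- properCount vs number of distinct prime factors
theorem properCount_eq (N : ℕ) (hN : 1 ≤ N) :
    properCount N = N.primeFactors.card - (if N.Prime then 1 else 0) := by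
  have hset : (Finset.range N).filter (fun q => Nat.Prime q ∧ q ∣ N) = N.primeFactors.erase N := by
    ext q
    simp only [Finset.mem_filter, Finset.mem_range, Finset.mem_erase, Nat.mem_primeFactors]
    constructor
    · rintro ⟨hlt, hp, hdv⟩
      exact ⟨by omega, hp, hdv, by omega⟩
    · rintro ⟨hne, hp, hdv, -⟩
      have := Nat.le_of_dvd (by omega) hdv
      exact ⟨by omega, hp, hdv⟩
  have hmem : N ∈ N.primeFactors ↔ N.Prime := by
    simp only [Nat.mem_primeFactors]
    constructor
    · rintro ⟨hp, -, -⟩; exact hp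
    · intro hp; exact ⟨hp, dvd_refl N, by omega⟩
  rw [properCount, hset, Finset.card_erase_eq_ite]
  by_cases hp : N.Prime
  · rw [if_pos (hmem.mpr hp), if_pos hp]
  · rw [if_neg (fun h => hp (hmem.mp h)), if_neg hp]
    omega

-- ===== VERDICT (by name: the statement is the Claim_ definition above) =====
theorem SpecialNum_spec : Claim_equal_SpecialNum := by
  intro n p _
  show SpecialNum n p = SpecialNum_alt n p
  by_cases hn : n ≤ 1
  · have hA : PySem.List.pyRange 2 n 1 = [] := PySem.List.pyRange_one_eq_nil (by omega)
    have hB : outerB n 2 0 = (0, n) := by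
      rw [outerB, dif_neg (by omega : ¬((2:Int) ≤ 2 ∧ 2 * 2 ≤ n))]
    simp only [SpecialNum, SpecialNum_alt, hA, hB, List.foldl_nil]
    have hc : ¬((1:Int) < n ∧ n < n) := by omega
    rw [if_neg hc]
  · have hn2 : (2:Int) ≤ n := by omega
    have hN1 : 1 ≤ n.toNat := by omega
    have hsmall : ∀ q : ℕ, q.Prime → (q : Int) < 2 → ¬ (q : Int) ∣ n := by
      intro q hq hlt
      have h2 := hq.two_le
      omega
    obtain ⟨r, heq, hrdvd, hrpos, hrprime, hrm⟩ :=
      outerB_spec n 2 0 (le_refl 2) (by omega) hsmall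
    have hCN := properCount_eq n.toNat hN1
    have hfin : (properCount n.toNat : Int)
        = (if 1 < r ∧ r < n
            then 0 + (n.toNat.primeFactors.card : Int) - (if 1 < r then 1 else 0) + 1
            else 0 + (n.toNat.primeFactors.card : Int) - (if 1 < r then 1 else 0)) := by
      by_cases hr1 : 1 < r
      · by_cases hrn : r < n
        · have hNp : ¬ n.toNat.Prime := by
            intro hp
            have := hrm hp
            omega
          rw [if_pos ⟨hr1, hrn⟩, if_pos hr1, hCN, if_neg hNp]
          omega
        · have hreq : r = n := le_antisymm (Int.le_of_dvd (by omega) hrdvd) (by omega)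
          have hNp : n.toNat.Prime := by
            have := hrprime hr1
            rwa [hreq] at this
          have hcard : 1 ≤ n.toNat.primeFactors.card :=
            Finset.card_pos.mpr ⟨n.toNat, Nat.mem_primeFactors.mpr ⟨hNp, dvd_refl _, by omega⟩⟩
          rw [if_neg (by tauto), if_pos hr1, hCN, if_pos hNp]
          omega
      · have hNp : ¬ n.toNat.Prime := by
          intro hp
          have := hrm hp
          omega
        rw [if_neg (by tauto), if_neg hr1, hCN, if_neg hNp]
        omega
    simp only [SpecialNum, SpecialNum_alt, heq, Acount_eq n hn2, hfin]
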